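-- pv_equiv track=rewrite | github.com/lucasg-mm/arborator-grew-nilc | backend/app/lexicon/controller.py | transform_grew_verif
-- ===== SOURCE A (Python) =====
-- def transform_grew_verif(ligne1, ligne2): #Voir différences entre deux lignes
-- 	liste=[]
-- 	if len(ligne1) > len(ligne2):
-- 		maximum = len(ligne1)
-- 	else:
-- 		maximum = len(ligne2)
-- 	for i in range(maximum):
-- 		try:
-- 			if ligne1[i] != ligne2[i]:
-- 				liste.append(i)
-- 		except IndexError:
-- 			liste.append(i)
-- 	return liste
-- ===== SOURCE B (Python) =====
-- def transform_grew_verif(ligne1, ligne2):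
--     n = min(len(ligne1), len(ligne2))
--     m = max(len(ligne1), len(ligne2))
--     diffs = [i for i in range(n) if ligne1[i] != ligne2[i]]
--     return diffs + list(range(n, m))
-- ===== Notes on version B (the rewrite author's own statement) =====
-- stated objective: simpler
-- what changed: Replaces the try/except-guarded single loop over max(len) with two exception-free phases: a comparison pass over the common prefix (min length) plus an unconditional range of tail indices, which are always differences.
import Mathlib
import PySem

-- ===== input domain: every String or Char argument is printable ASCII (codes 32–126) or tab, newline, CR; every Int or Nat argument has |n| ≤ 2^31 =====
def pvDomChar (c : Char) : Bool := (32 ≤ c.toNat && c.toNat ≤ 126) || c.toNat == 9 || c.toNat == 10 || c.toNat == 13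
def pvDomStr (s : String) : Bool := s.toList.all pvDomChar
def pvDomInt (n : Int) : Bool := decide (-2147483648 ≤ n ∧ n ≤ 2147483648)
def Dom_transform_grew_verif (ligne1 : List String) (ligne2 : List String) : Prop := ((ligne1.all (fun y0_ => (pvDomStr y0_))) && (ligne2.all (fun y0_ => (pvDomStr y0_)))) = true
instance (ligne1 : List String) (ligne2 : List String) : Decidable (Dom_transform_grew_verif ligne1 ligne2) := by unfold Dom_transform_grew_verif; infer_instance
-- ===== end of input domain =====

-- B replaces A's try/except loop over max(len) by an exception-free comparison pass over
-- the common prefix plus an unconditional tail range; same cost, simpler control flow.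

-- ===== PORT A =====
-- the try/except body: both lookups succeed → compare; an IndexError on either → append i
def pvABody (ligne1 ligne2 : List String) (liste : List Int) (i : Int) : List Int :=
  match PySem.List.pyGet? ligne1 i, PySem.List.pyGet? ligne2 i with
  | some a, some b => if a ≠ b then liste ++ [i] else liste
  | _, _ => liste ++ [i]

def transform_grew_verif (ligne1 : List String) (ligne2 : List String) : List Int :=
  let maximum : Int := if ligne1.length > ligne2.length then (ligne1.length : Int) else (ligne2.length : Int)
  (PySem.List.pyRange 0 maximum 1).foldl (pvABody ligne1 ligne2) []

-- ===== PORT B =====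
def transform_grew_verif_alt (ligne1 : List String) (ligne2 : List String) : List Int :=
  let n := min ligne1.length ligne2.length
  let m := max ligne1.length ligne2.length
  ((List.range n).filter (fun i => ligne1[i]? ≠ ligne2[i]?)).map (fun (i : Nat) => (i : Int))
    ++ (List.range' n (m - n)).map (fun (i : Nat) => (i : Int))

-- ===== PRECONDITION & SPEC =====
def Spec_transform_grew_verif (ligne1 : List String) (ligne2 : List String) (out : List Int) : Prop := out = transform_grew_verif_alt ligne1 ligne2
instance (ligne1 : List String) (ligne2 : List String) (out : List Int) : Decidable (Spec_transform_grew_verif ligne1 ligne2 out) := by unfold Spec_transform_grew_verif; infer_instance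

-- ===== CLAIM (what is proved, stated in full; the proofs are below) =====
def Claim_equal_transform_grew_verif : Prop := ∀ (ligne1 : List String) (ligne2 : List String), Dom_transform_grew_verif ligne1 ligne2 → Spec_transform_grew_verif ligne1 ligne2 (transform_grew_verif ligne1 ligne2)

-- ===== LEMMAS AND PROOFS =====

-- A's body appends i exactly when the predicate pvAPred holds
def pvAPred (ligne1 ligne2 : List String) (i : Int) : Bool :=
  match PySem.List.pyGet? ligne1 i, PySem.List.pyGet? ligne2 i with
  | some a, some b => a ≠ b
  | _, _ => true

theorem pvABody_eq_if (ligne1 ligne2 : List String) (liste : List Int) (i : Int) :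
    pvABody ligne1 ligne2 liste i =
      if pvAPred ligne1 ligne2 i then liste ++ [i] else liste := by
  unfold pvABody pvAPred
  rcases PySem.List.pyGet? ligne1 i with _ | a <;> rcases PySem.List.pyGet? ligne2 i with _ | b <;> simp

theorem pvA_filter (ligne1 ligne2 : List String) :
    transform_grew_verif ligne1 ligne2 =
      (PySem.List.pyRange 0 (max ligne1.length ligne2.length : Nat) 1).filter
        (pvAPred ligne1 ligne2) := by
  unfold transform_grew_verif
  have hmax : (if ligne1.length > ligne2.length then (ligne1.length : Int) else (ligne2.length : Int))
      = ((max ligne1.length ligne2.length : Nat) : Int) := by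
    split <;> simp <;> omega
  rw [hmax]
  have hb : pvABody ligne1 ligne2 = fun liste i => if pvAPred ligne1 ligne2 i then liste ++ [i] else liste := by
    funext liste i; exact pvABody_eq_if ligne1 ligne2 liste i
  rw [hb]
  have := PySem.List.foldl_append_if (pvAPred ligne1 ligne2) (fun i => i)
    (PySem.List.pyRange 0 ((max ligne1.length ligne2.length : Nat) : Int) 1) []
  simpa using this

-- ===== VERDICT (by name: the statement is the Claim_ definition above) =====
theorem transform_grew_verif_spec : Claim_equal_transform_grew_verif := by
  intro ligne1 ligne2 _
  show transform_grew_verif ligne1 ligne2 = transform_grew_verif_alt ligne1 ligne2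
  rw [pvA_filter]
  unfold transform_grew_verif_alt
  set n := min ligne1.length ligne2.length with hn
  set m := max ligne1.length ligne2.length with hm
  rw [PySem.List.pyRange_one_append 0 (n : Int) (m : Int) (by positivity) (by exact_mod_cast min_le_max)]
  rw [List.filter_append]
  congr 1
  · -- prefix part: both indices in range
    rw [PySem.List.pyRange_one, List.filter_map]
    simp only [zero_add, Int.sub_zero, Int.toNat_natCast]
    congr 1
    apply List.filter_congr
    intro k hk
    have hk1 : k < ligne1.length := by
      have := List.mem_range.mp hk; omega
    have hk2 : k < ligne2.length := by
      have := List.mem_range.mp hk; omega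
    simp only [Function.comp]
    unfold pvAPred
    rw [PySem.List.pyGet?_natCast, PySem.List.pyGet?_natCast]
    rw [List.getElem?_eq_getElem hk1, List.getElem?_eq_getElem hk2]
    simp
  · -- tail part: one of the two lists is exhausted, every index is kept
    have htail : ∀ i ∈ PySem.List.pyRange (n : Int) (m : Int) 1, pvAPred ligne1 ligne2 i = true := by
      intro i hi
      have hi' := (PySem.List.mem_pyRange_one).mp hi
      have hge : ligne1.length ≤ i.toNat ∨ ligne2.length ≤ i.toNat := by omega
      unfold pvAPred
      have hnone : PySem.List.pyGet? ligne1 i = none ∨ PySem.List.pyGet? ligne2 i = none := by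
        rcases hge with h | h
        · left
          rw [show i = ((i.toNat : Nat) : Int) by omega, PySem.List.pyGet?_natCast]
          exact List.getElem?_eq_none h
        · right
          rw [show i = ((i.toNat : Nat) : Int) by omega, PySem.List.pyGet?_natCast]
          exact List.getElem?_eq_none h
      rcases hnone with h | h <;> rw [h] <;> rcases hx : PySem.List.pyGet? ligne1 i <;> rcases hy : PySem.List.pyGet? ligne2 i <;> simp_all
    rw [List.filter_eq_self.mpr htail]
    rw [PySem.List.pyRange_one, List.range'_eq_map_range, List.map_map]
    rw [show ((m : Int) - (n : Int)).toNat = m - n by omega]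
    exact List.map_congr_left (fun k _ => by simp [Function.comp])
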